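-- pv_equiv track=rewrite | github.com/anubhab001/baksheesh | reference-software/baksheesh_zorro_miniT.py | expand_subkeys
-- ===== SOURCE A (Python) =====
-- from typing import List, Sequence
--
-- RC = (
--     2, 33, 16, 9, 36, 19, 40, 53, 26, 13, 38, 51, 56, 61, 62, 31,
--     14, 7, 34, 49, 24, 45, 54, 59, 28, 47, 22, 43, 20, 11, 4, 3, 32, 17, 8,
-- )
--
-- N_rounds = 35
--
-- def nibbles_to_words(nibbles: Sequence[int]) -> List[int]:
--     if len(nibbles) % 4:
--         raise ValueError("Nibble length must be a multiple of four")
--     words: List[int] = []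
--     for i in range(0, len(nibbles), 4):
--         word = 0
--         for shift, nib in zip((12, 8, 4, 0), nibbles[i : i + 4]):
--             word |= (nib & 0xF) << shift
--         words.append(word)
--     return words
--
-- def words_to_bits_lsb(words: Sequence[int]) -> List[int]:
--     bits: List[int] = []
--     for word in words:
--         for shift in range(16):
--             bits.append((word >> shift) & 1)
--     return bits
--
-- def bits_to_words_lsb(bits: Sequence[int]) -> List[int]:
--     if len(bits) != 128:
--         raise ValueError("Word conversion expects exactly 128 bits")
--     words: List[int] = []
--     for group in range(8):
--         base = 16 * group
--         word = 0
--         for offset in range(16):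
--             word |= bits[base + offset] << offset
--         words.append(word)
--     return words
--
-- def expand_subkeys(key: Sequence[int], rounds: int = N_rounds) -> List[List[int]]:
--     if rounds > len(RC):
--         raise ValueError(f"Requested {rounds} rounds but only {len(RC)} round constants")
--     current = nibbles_to_words(key)
--     subkeys = [current[:]]
--     for _ in range(rounds):
--         bits = words_to_bits_lsb(current)
--         bits = bits[1:] + bits[:1]  # Rotate left by 1
--         current = bits_to_words_lsb(bits)
--         subkeys.append(current[:])
--     return subkeys
-- ===== SOURCE B (Python) =====
-- from typing import List, Sequence
--
-- RC = (
--     2, 33, 16, 9, 36, 19, 40, 53, 26, 13, 38, 51, 56, 61, 62, 31,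
--     14, 7, 34, 49, 24, 45, 54, 59, 28, 47, 22, 43, 20, 11, 4, 3, 32, 17, 8,
-- )
--
-- N_rounds = 35
--
-- def expand_subkeys(key: Sequence[int], rounds: int = N_rounds) -> List[List[int]]:
--     if rounds > len(RC):
--         raise ValueError(f"Requested {rounds} rounds but only {len(RC)} round constants")
--     if len(key) % 4:
--         raise ValueError("Nibble length must be a multiple of four")
--     words: List[int] = []
--     for i in range(0, len(key), 4):
--         a, b, c, d = key[i:i + 4]
--         words.append(((a & 0xF) << 12) | ((b & 0xF) << 8) | ((c & 0xF) << 4) | (d & 0xF))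
--     bits = [(w >> s) & 1 for w in words for s in range(16)]
--     # Subkey r is the key bit-rotated left by r: word g bit o is bit (16*g + o + r) mod 128.
--     return [words] + [
--         [sum(bits[(16 * g + o + r) % 128] << o for o in range(16)) for g in range(8)]
--         for r in range(1, rounds + 1)
--     ]
-- ===== Notes on version B (the rewrite author's own statement) =====
-- stated objective: alternative
-- what changed: B converts the key to its 128-bit array once and derives subkey r directly as the bits rotated by offset r (index arithmetic mod 128), eliminating A's mutable inter-round word state and its per-round words-to-bits/bits-to-words round-trips.
import Mathlib
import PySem

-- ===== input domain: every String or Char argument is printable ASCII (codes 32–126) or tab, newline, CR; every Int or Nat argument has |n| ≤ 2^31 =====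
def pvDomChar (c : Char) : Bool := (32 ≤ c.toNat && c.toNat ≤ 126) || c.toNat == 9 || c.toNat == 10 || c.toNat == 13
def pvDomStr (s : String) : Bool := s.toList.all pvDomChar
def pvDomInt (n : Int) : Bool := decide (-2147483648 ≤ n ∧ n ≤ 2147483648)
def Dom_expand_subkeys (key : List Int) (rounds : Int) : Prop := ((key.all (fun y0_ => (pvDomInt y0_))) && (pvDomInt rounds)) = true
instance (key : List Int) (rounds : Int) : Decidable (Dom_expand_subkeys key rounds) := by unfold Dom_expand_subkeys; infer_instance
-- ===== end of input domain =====

-- B derives each subkey directly from the fixed initial 128-bit array via a rotation-by-r offset,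
-- removing A's mutable inter-round word state and its per-round word/bit round-trips (alternative algorithm, same cost).


-- ===== PORT A =====
-- nibbles_to_words: 'len % 4' and indices are nonnegative, so Nat '%' is exact here.
def pvA_n2w (nibbles : List Int) : Option (List Int) :=
  if nibbles.length % 4 ≠ 0 then none            -- raise ValueError
  else some ((PySem.List.pyRange 0 (nibbles.length : Int) 4).map (fun i =>
    (List.zip ([12, 8, 4, 0] : List Nat) (PySem.List.slice nibbles (some i) (some (i + 4)))).foldl
      (fun word p => PySem.Int.bor word ((PySem.Int.band p.2 15) <<< p.1)) 0))

def pvA_w2b (words : List Int) : List Int :=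
  words.foldl (fun bits word =>
    bits ++ (List.range 16).map (fun shift => PySem.Int.band (word >>> shift) 1)) []

-- bits[base + offset]: in range by the length-128 guard, so getD is exact.
def pvA_b2w (bits : List Int) : Option (List Int) :=
  if bits.length ≠ 128 then none                 -- raise ValueError
  else some ((List.range 8).map (fun group =>
    (List.range 16).foldl (fun word offset =>
      PySem.Int.bor word ((bits.getD (16 * group + offset) 0) <<< offset)) 0))

def pvA_loop : Nat → List Int → List (List Int) → Option (List (List Int))
  | 0, _, subkeys => some subkeys
  | n + 1, current, subkeys =>
    let bits := pvA_w2b current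
    let bits2 := PySem.List.slice bits (some 1) none ++ PySem.List.slice bits none (some 1)
    match pvA_b2w bits2 with
    | none => none
    | some cur => pvA_loop n cur (subkeys ++ [cur])

def expand_subkeys (key : List Int) (rounds : Int) : List (List Int) :=
  if rounds > 35 then []                         -- raise ValueError (len(RC) = 35)
  else match pvA_n2w key with
  | none => []
  | some current => (pvA_loop rounds.toNat current [current]).getD []

-- ===== PORT B =====
def pvB_pack : List Int → List Int
  | a :: b :: c :: d :: rest =>
    (PySem.Int.bor (PySem.Int.bor (PySem.Int.bor
      ((PySem.Int.band a 15) <<< 12) ((PySem.Int.band b 15) <<< 8))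
      ((PySem.Int.band c 15) <<< 4)) (PySem.Int.band d 15)) :: pvB_pack rest
  | _ => []

def pvB_bits (words : List Int) : List Int :=
  words.flatMap (fun w => (List.range 16).map (fun s => PySem.Int.band (w >>> s) 1))

-- bits[(16*g+o+r) % 128]: in range whenever bits has 128 entries (inside Pre_), so getD is exact.
def expand_subkeys_alt (key : List Int) (rounds : Int) : List (List Int) :=
  if rounds > 35 then []                         -- raise ValueError (len(RC) = 35)
  else if key.length % 4 ≠ 0 then []             -- raise ValueError
  else
    let words := pvB_pack key
    let bits := pvB_bits words
    words :: (List.range' 1 rounds.toNat).map (fun r =>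
      (List.range 8).map (fun g =>
        (List.range 16).foldl (fun acc o =>
          acc + ((bits.getD ((16 * g + o + r) % 128) 0) <<< o)) 0))

-- ===== PRECONDITION & SPEC =====
-- Exactly where A returns: rounds ≤ 35 (guard), key length a multiple of 4 (nibbles_to_words),
-- and, when at least one round runs, a 128-bit key (bits_to_words_lsb demands 32 nibbles).
def Pre_expand_subkeys (key : List Int) (rounds : Int) : Prop :=
  rounds ≤ 35 ∧ key.length % 4 = 0 ∧ (rounds ≤ 0 ∨ key.length = 32)
instance (key : List Int) (rounds : Int) : Decidable (Pre_expand_subkeys key rounds) := by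
  unfold Pre_expand_subkeys; infer_instance

def pvWitness_expand_subkeys : List Int × Int :=
  ([1, 2, 3, 4, 5, 6, 7, 8, 9, 10, 11, 12, 13, 14, 15, 0,
    1, 2, 3, 4, 5, 6, 7, 8, 9, 10, 11, 12, 13, 14, 15, 0], 3)

def Spec_expand_subkeys (key : List Int) (rounds : Int) (out : List (List Int)) : Prop := out = expand_subkeys_alt key rounds
instance (key : List Int) (rounds : Int) (out : List (List Int)) : Decidable (Spec_expand_subkeys key rounds out) := by unfold Spec_expand_subkeys; infer_instance

-- ===== CLAIM (what is proved, stated in full; the proofs are below) =====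
def Claim_equal_expand_subkeys : Prop := ∀ (key : List Int) (rounds : Int), Dom_expand_subkeys key rounds → Pre_expand_subkeys key rounds → Spec_expand_subkeys key rounds (expand_subkeys key rounds)

-- ===== LEMMAS AND PROOFS =====

-- the value pvA_b2w returns on 128-bit input (proof helper)
def pvBW (bits : List Int) : List Int :=
  (List.range 8).map (fun group =>
    (List.range 16).foldl (fun word offset =>
      PySem.Int.bor word ((bits.getD (16 * group + offset) 0) <<< offset)) 0)

-- Nat: or-ing a fresh high bit into a small number is addition
theorem pv_lor_two_pow {x n : Nat} (h : x < 2 ^ n) : x ||| 2 ^ n = x + 2 ^ n := by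
  apply Nat.eq_of_testBit_eq
  intro j
  rcases lt_trichotomy j n with hj | rfl | hj
  · rw [Nat.testBit_lor, Nat.add_comm, Nat.testBit_two_pow_add_gt hj, Nat.testBit_two_pow]
    simp [Nat.ne_of_gt hj]
  · rw [Nat.testBit_lor, Nat.add_comm, Nat.testBit_two_pow_add_eq,
      Nat.testBit_lt_two_pow h, Nat.testBit_two_pow]
    simp
  · have h1 : x < 2 ^ j := lt_of_lt_of_le h (Nat.pow_le_pow_right (by omega) (by omega))
    have h2 : x + 2 ^ n < 2 ^ j := by
      have ha : 2 ^ (n + 1) ≤ 2 ^ j := Nat.pow_le_pow_right (by omega) (by omega)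
      have hb : 2 ^ n + 2 ^ n = 2 ^ (n + 1) := by ring
      omega
    rw [Nat.testBit_lor, Nat.testBit_lt_two_pow h1, Nat.testBit_lt_two_pow h2,
      Nat.testBit_two_pow]
    simp [show ¬ n = j by omega]

-- Int: bit extraction of a Nat cast
theorem pv_band_shift_cast (v : Nat) (s : Nat) :
    PySem.Int.band ((v : Int) >>> s) 1 = ((v / 2 ^ s % 2 : Nat) : Int) := by
  rw [show ((v : Int) >>> s) = ((v >>> s : Nat) : Int) by simp [Int.natCast_shiftRight],
    show (1 : Int) = ((1 : Nat) : Int) from rfl, PySem.Int.band_natCast,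
    Nat.and_one_is_mod, Nat.shiftRight_eq_div_pow]

-- master word lemma: the or-fold of 0/1 bits equals the sum-fold, stays below 2^n, and its bits read back
theorem pv_word (f : Nat → Int) (h01 : ∀ o, f o = 0 ∨ f o = 1) (n : Nat) :
    (0 ≤ (List.range n).foldl (fun w o => PySem.Int.bor w ((f o) <<< o)) 0 ∧
      (List.range n).foldl (fun w o => PySem.Int.bor w ((f o) <<< o)) 0 < 2 ^ n) ∧
    (List.range n).foldl (fun w o => PySem.Int.bor w ((f o) <<< o)) 0
      = (List.range n).foldl (fun w o => w + ((f o) <<< o)) 0 ∧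
    (∀ s, s < n →
      PySem.Int.band (((List.range n).foldl (fun w o => PySem.Int.bor w ((f o) <<< o)) 0) >>> s) 1 = f s) := by
  induction n with
  | zero => refine ⟨⟨le_refl _, by norm_num⟩, rfl, by omega⟩
  | succ n ih =>
    obtain ⟨⟨hnn, hlt⟩, heq, hbit⟩ := ih
    have hcast : ((2 : Int) ^ n) = ((2 ^ n : Nat) : Int) := by push_cast; ring
    set wn := (List.range n).foldl (fun w o => PySem.Int.bor w ((f o) <<< o)) 0 with hwn
    have hw : wn = ((wn.toNat : Nat) : Int) := (Int.toNat_of_nonneg hnn).symm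
    set m : Nat := wn.toNat with hm
    have hmlt : m < 2 ^ n := by rw [hw, hcast] at hlt; exact_mod_cast hlt
    rw [List.range_succ, List.foldl_append, List.foldl_append]
    simp only [List.foldl_cons, List.foldl_nil, ← hwn, ← heq]
    rcases h01 n with h | h
    · have hz : (f n) <<< n = 0 := by rw [h, Int.shiftLeft_eq]; ring
      rw [hz, PySem.Int.bor_zero, add_zero]
      refine ⟨⟨hnn, ?_⟩, rfl, ?_⟩
      · have h1 : (2 : Int) ^ (n + 1) = 2 ^ n + 2 ^ n := by ring
        have h2 : (0 : Int) < 2 ^ n := by positivity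
        omega
      · intro s hs
        rcases Nat.lt_or_ge s n with hs' | hs'
        · exact hbit s hs'
        · have hsn : s = n := by omega
          rw [hsn, hw, pv_band_shift_cast, Nat.div_eq_of_lt hmlt]
          simp [h]
    · have hone : (f n) <<< n = ((2 ^ n : Nat) : Int) := by
        rw [h, Int.shiftLeft_eq, ← hcast]; ring
      have hbor : PySem.Int.bor wn ((f n) <<< n) = ((m + 2 ^ n : Nat) : Int) := by
        rw [hone, hw, PySem.Int.bor_natCast, pv_lor_two_pow hmlt]
      rw [hbor]
      refine ⟨⟨by positivity, ?_⟩, ?_, ?_⟩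
      · have h1 : (2 : Int) ^ (n + 1) = 2 ^ n + 2 ^ n := by ring
        have h2 : ((m + 2 ^ n : Nat) : Int) = (m : Int) + 2 ^ n := by push_cast; ring
        omega
      · rw [hw, hone]; push_cast; ring
      · intro s hs
        rw [pv_band_shift_cast]
        rcases Nat.lt_or_ge s n with hs' | hs'
        · have hsplit : m + 2 ^ n = m + 2 ^ (n - s - 1) * 2 * 2 ^ s := by
            have hp : 2 ^ (n - s - 1) * 2 * 2 ^ s = 2 ^ n := by
              rw [show 2 ^ (n - s - 1) * 2 * 2 ^ s = 2 ^ (n - s - 1 + 1 + s) by ring]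
              congr 1; omega
            omega
          rw [hsplit, show m + 2 ^ (n - s - 1) * 2 * 2 ^ s = m + (2 ^ (n - s - 1) * 2) * 2 ^ s by ring,
            Nat.add_mul_div_right _ _ (by positivity : 0 < 2 ^ s),
            Nat.add_mul_mod_self_right]
          have hb := hbit s hs'
          rw [hw, pv_band_shift_cast] at hb
          exact hb
        · have hsn : s = n := by omega
          rw [hsn, show m + 2 ^ n = m + 1 * 2 ^ n by ring,
            Nat.add_mul_div_right _ _ (by positivity : 0 < 2 ^ n),
            Nat.div_eq_of_lt hmlt]
          simp [h]

theorem pv_bits_01 (ws : List Int) : ∀ b ∈ pvB_bits ws, b = 0 ∨ b = 1 := by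
  intro b hb
  simp only [pvB_bits, List.mem_flatMap, List.mem_map, List.mem_range] at hb
  obtain ⟨w, _, s, _, rfl⟩ := hb
  rw [PySem.Int.band_one]
  have h1 := PySem.Int.mod_nonneg (w >>> s) (by norm_num : (0:Int) < 2)
  have h2 := PySem.Int.mod_lt (w >>> s) (by norm_num : (0:Int) < 2)
  omega

theorem pv_getD_01 (bs : List Int) (h : ∀ b ∈ bs, b = 0 ∨ b = 1) (i : Nat) :
    bs.getD i 0 = 0 ∨ bs.getD i 0 = 1 := by
  rcases Nat.lt_or_ge i bs.length with hi | hi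
  · rw [List.getD_eq_getElem bs 0 hi]
    exact h _ (bs.getElem_mem hi)
  · left
    rw [List.getD_eq_getElem?_getD, List.getElem?_eq_none (by omega)]
    rfl

theorem pv_bits_length (ws : List Int) : (pvB_bits ws).length = 16 * ws.length := by
  induction ws with
  | nil => rfl
  | cons w ws ih => simp only [pvB_bits, List.flatMap_cons, List.length_append] at ih ⊢; simp [ih]; ring

theorem pv_pack_length (key : List Int) (h : key.length % 4 = 0) :
    (pvB_pack key).length = key.length / 4 := by
  induction key using pvB_pack.induct with
  | case1 a b c d rest ih =>
    simp only [List.length_cons] at h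
    simp only [pvB_pack, List.length_cons]
    rw [ih (by omega)]
    omega
  | case2 t h2 =>
    match t, h2 with
    | [], _ => rfl
    | [_], _ => simp at h
    | [_, _], _ => simp at h
    | [_, _, _], _ => simp at h
    | a :: b :: c :: d :: r, h2 => exact absurd rfl (fun hh => h2 a b c d r hh)

theorem pv_w2b_flat (ws : List Int) : pvA_w2b ws = pvB_bits ws := by
  rw [pvA_w2b, pvB_bits, PySem.List.foldl_append_eq_flatMap, List.nil_append]

theorem pv_map_getD_range (bs : List Int) :
    (List.range bs.length).map (fun i => bs.getD i 0) = bs := by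
  apply List.ext_getElem (by simp)
  intro i h1 h2
  simp [List.getD_eq_getElem?_getD, List.getElem?_eq_getElem h2]

-- round-trip: reading back the bits of the packed words gives the bit list back
theorem pv_roundtrip (bs : List Int) (hl : bs.length = 128) (h01 : ∀ b ∈ bs, b = 0 ∨ b = 1) :
    pvB_bits (pvBW bs) = bs := by
  have hmap : pvB_bits (pvBW bs)
      = ((List.range 8).map (fun g => (List.range 16).map (fun s => bs.getD (16 * g + s) 0))).flatten := by
    rw [pvB_bits, pvBW, List.flatMap_def, List.map_map]
    congr 1
    apply List.map_congr_left
    intro g _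
    apply List.map_congr_left
    intro s hs
    simp only [List.mem_range] at hs
    obtain ⟨_, _, hbits⟩ := pv_word (fun o => bs.getD (16 * g + o) 0) (fun o => pv_getD_01 bs h01 _) 16
    exact hbits s hs
  have hflat : ((List.range 8).map (fun g => (List.range 16).map (fun s => bs.getD (16 * g + s) 0))).flatten
      = (List.range 128).map (fun i => bs.getD i 0) := by
    norm_num [List.range_succ]
  rw [hmap, hflat, show (128 : Nat) = bs.length from hl.symm, pv_map_getD_range]

-- step-4 range, in List.range form
theorem pv_range4 (m : Nat) : PySem.List.pyRange 0 ((4 * m : Nat) : Int) 4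
    = (List.range m).map (fun k => ((4 * k : Nat) : Int)) := by
  rcases Nat.eq_zero_or_pos m with rfl | hm
  · simp [PySem.List.pyRange_of_pos 0 0 (by norm_num : (0:Int) < 4)]
  · rw [PySem.List.pyRange_of_pos _ _ (by norm_num)]
    have hc : (if (0 : Int) < ((4 * m : Nat) : Int)
        then ((((4 * m : Nat) : Int) - 0 + 4 - 1) / 4).toNat else 0) = m := by
      rw [if_pos (by exact_mod_cast Nat.pos_of_ne_zero (by omega))]
      have h1 : (((4 * m : Nat) : Int) - 0 + 4 - 1) = ((4 * m + 3 : Nat) : Int) := by push_cast; ring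
      rw [h1, show (4 : Int) = ((4 : Nat) : Int) from rfl, ← Int.natCast_div, Int.toNat_natCast]
      omega
    rw [hc]
    apply List.map_congr_left
    intro k _
    push_cast; ring

-- A's nibble word at chunk start j, as B packs it
theorem pv_word4 (key : List Int) (j : Nat) :
    (List.zip ([12, 8, 4, 0] : List Nat) (PySem.List.slice key (some ((j : Nat) : Int)) (some (((j : Nat) : Int) + 4)))).foldl
      (fun word p => PySem.Int.bor word ((PySem.Int.band p.2 15) <<< p.1)) 0
    = (List.zip ([12, 8, 4, 0] : List Nat) ((key.drop j).take 4)).foldl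
      (fun word p => PySem.Int.bor word ((PySem.Int.band p.2 15) <<< p.1)) 0 := by
  rw [show (((j : Nat) : Int) + 4) = (((j : Nat) : Int) + ((4 : Nat) : Int)) from rfl,
    PySem.List.slice_natCast_add]

theorem pv_n2w_pack (key : List Int) (h : key.length % 4 = 0) :
    pvA_n2w key = some (pvB_pack key) := by
  rw [pvA_n2w, if_neg (by omega)]
  congr 1
  obtain ⟨m, hm⟩ : ∃ m, key.length = 4 * m := ⟨key.length / 4, by omega⟩
  clear h
  induction key using pvB_pack.induct generalizing m with
  | case1 a b c d rest ih =>
    simp only [List.length_cons] at hm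
    obtain ⟨m', rfl⟩ : ∃ m', m = m' + 1 := ⟨m - 1, by omega⟩
    simp only [List.length_cons]
    rw [hm, pv_range4, List.range_succ_eq_map]
    simp only [List.map_cons, List.map_map]
    simp only [pvB_pack]
    congr 1
    · rw [pv_word4]
      norm_num
      rw [PySem.Int.bor_comm 0, PySem.Int.bor_zero,
        show PySem.Int.band d 15 <<< (0 : Int) = PySem.Int.band d 15 by
          rw [show (0 : Int) = ((0 : Nat) : Int) by simp, Int.shiftLeft_natCast_right,
            Int.shiftLeft_eq]
          norm_num]
    · have hr : rest.length = 4 * m' := by omega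
      rw [← ih m' hr, hr, pv_range4, List.map_map]
      apply List.map_congr_left
      intro k _
      simp only [Function.comp_apply, Nat.succ_eq_add_one]
      rw [pv_word4, pv_word4, show 4 * (k + 1) = 4 * k + 1 + 1 + 1 + 1 by ring]
      simp [List.drop_succ_cons]
  | case2 t h2 =>
    match t, h2 with
    | [], _ => simpa [pvB_pack] using pv_range4 0
    | [_], _ => simp at hm; omega
    | [_, _], _ => simp at hm; omega
    | [_, _, _], _ => simp at hm; omega
    | a :: b :: c :: d :: r, h2 => exact absurd rfl (fun hh => h2 a b c d r hh)

-- B's row r is the packing of the bit list rotated by r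
theorem pv_row (bs : List Int) (r : Nat) (hl : bs.length = 128) (h01 : ∀ b ∈ bs, b = 0 ∨ b = 1) :
    (List.range 8).map (fun g =>
      (List.range 16).foldl (fun acc o =>
        acc + ((bs.getD ((16 * g + o + r) % 128) 0) <<< o)) 0) = pvBW (bs.rotate r) := by
  rw [pvBW]
  apply List.map_congr_left
  intro g hg
  simp only [List.mem_range] at hg
  obtain ⟨_, heq, _⟩ := pv_word (fun o => bs.getD ((16 * g + o + r) % 128) 0)
    (fun o => pv_getD_01 bs h01 _) 16
  rw [← heq]
  apply PySem.List.foldl_congr_mem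
  intro acc o ho
  simp only [List.mem_range] at ho
  have hi1 : 16 * g + o < (bs.rotate r).length := by simp [hl]; omega
  have hi2 : (16 * g + o + r) % 128 < bs.length := by rw [hl]; exact Nat.mod_lt _ (by norm_num)
  rw [List.getD_eq_getElem _ 0 hi1, List.getD_eq_getElem _ 0 hi2, List.getElem_rotate]
  simp only [hl]

-- bits[1:] + bits[:1] is rotation by one
theorem pv_rot1 (bs : List Int) (h : 1 ≤ bs.length) :
    PySem.List.slice bs (some 1) none ++ PySem.List.slice bs none (some 1) = bs.rotate 1 := by
  rw [PySem.List.slice_from_one, PySem.List.slice_to bs (b:=1) (by norm_num),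
    List.rotate_eq_drop_append_take h, List.drop_one]
  rfl

theorem pv_b2w_bw (bs : List Int) (hl : bs.length = 128) :
    pvA_b2w bs = some (pvBW bs) := by
  rw [pvA_b2w, if_neg (by omega)]
  rfl

theorem pv_loop_step (n : Nat) (cur : List Int) (acc : List (List Int)) (w : List Int)
    (hw : pvA_b2w (PySem.List.slice (pvA_w2b cur) (some 1) none
        ++ PySem.List.slice (pvA_w2b cur) none (some 1)) = some w) :
    pvA_loop (n + 1) cur acc = pvA_loop n w (acc ++ [w]) := by
  simp only [pvA_loop, hw]

-- A's loop from any state whose bit reading is bs appends the packed rotations of bs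
theorem pv_loop (k : Nat) : ∀ (cur bs : List Int) (acc : List (List Int)),
    pvA_w2b cur = bs → bs.length = 128 → (∀ b ∈ bs, b = 0 ∨ b = 1) →
    pvA_loop k cur acc
      = some (acc ++ (List.range k).map (fun i => pvBW (bs.rotate (i + 1)))) := by
  induction k with
  | zero => intro cur bs acc _ _ _; simp [pvA_loop]
  | succ k ih =>
    intro cur bs acc hcur hl h01
    have h01' : ∀ b ∈ bs.rotate 1, b = 0 ∨ b = 1 := fun b hb => h01 b (List.mem_rotate.1 hb)
    have hcur' : pvA_w2b (pvBW (bs.rotate 1)) = bs.rotate 1 := by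
      rw [pv_w2b_flat]
      exact pv_roundtrip _ (by simp [hl]) h01'
    have hstep := pv_loop_step k cur acc (pvBW (bs.rotate 1))
      (by rw [hcur, pv_rot1 bs (by omega), pv_b2w_bw (bs.rotate 1) (by simp [hl])])
    rw [hstep, ih (pvBW (bs.rotate 1)) (bs.rotate 1) _ hcur' (by simp [hl]) h01',
      List.range_succ_eq_map, List.map_cons, List.map_map, List.append_assoc,
      List.singleton_append]
    have htail : List.map (fun i => pvBW ((bs.rotate 1).rotate (i + 1))) (List.range k)
        = List.map ((fun i => pvBW (bs.rotate (i + 1))) ∘ Nat.succ) (List.range k) := by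
      apply List.map_congr_left
      intro i _
      exact congrArg pvBW (by rw [List.rotate_rotate]; congr 1; omega)
    rw [htail]

-- ===== VERDICT (by name: the statement is the Claim_ definition above) =====
theorem expand_subkeys_spec : Claim_equal_expand_subkeys := by
  intro key rounds _ hpre
  obtain ⟨hr35, h4, hlen⟩ := hpre
  have hB : expand_subkeys_alt key rounds = pvB_pack key :: (List.range' 1 rounds.toNat).map
      (fun r => (List.range 8).map (fun g => (List.range 16).foldl (fun acc o =>
        acc + (((pvB_bits (pvB_pack key)).getD ((16 * g + o + r) % 128) 0) <<< o)) 0)) := by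
    unfold expand_subkeys_alt
    rw [if_neg (by omega), if_neg (by omega)]
  have hA0 : expand_subkeys key rounds = (pvA_loop rounds.toNat (pvB_pack key) [pvB_pack key]).getD [] := by
    unfold expand_subkeys
    rw [if_neg (by omega), pv_n2w_pack key h4]
  unfold Spec_expand_subkeys
  rw [hA0, hB]
  by_cases hr0 : rounds ≤ 0
  · have hz : rounds.toNat = 0 := by omega
    rw [hz]
    simp [pvA_loop]
  · have h32 : key.length = 32 := by tauto
    obtain ⟨m, hm⟩ : ∃ m, rounds.toNat = m + 1 := ⟨rounds.toNat - 1, by omega⟩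
    have hbl : (pvB_bits (pvB_pack key)).length = 128 := by
      rw [pv_bits_length, pv_pack_length key h4, h32]
    have hb01 := pv_bits_01 (pvB_pack key)
    rw [hm, pv_loop (m + 1) _ _ _ (pv_w2b_flat _) hbl hb01, Option.getD_some,
      List.singleton_append]
    congr 1
    rw [List.range'_eq_map_range, List.map_map]
    apply List.map_congr_left
    intro i _
    simp only [Function.comp_apply]
    rw [pv_row _ _ hbl hb01]
    have hc : 1 + i = i + 1 := by omega
    rw [hc]
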